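-- pv_equiv track=rewrite | github.com/Vivek-modanwal/data-structures-and-algorithms | sparse_table.py | sparse_table
-- ===== SOURCE A (Python) =====
-- import math
--
-- def sparse_table(A):
-- 	N=len(A)
-- 	M=math.floor(math.log2(N))+1
-- 	temp=[0]*N
-- 	table=[temp.copy() for _ in range(M)]
-- 	for i in range(M):
-- 		for j in range(N-2**i+1):
-- 			if i==0:
-- 				table[i][j]=A[j]
-- 			else:
-- 				table[i][j]=min(table[i-1][j:j+2**(i-1)+1])
-- 	return table
-- ===== SOURCE B (Python) =====
-- def sparse_table(A):
--     N = len(A)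
--     table = [list(A)]
--     i = 1
--     while (1 << i) <= N:
--         half = 1 << (i - 1)
--         prev = table[-1]
--         row = [min(prev[j], prev[j + half]) for j in range(N - (1 << i) + 1)]
--         row += [0] * ((1 << i) - 1)
--         table.append(row)
--         i += 1
--     return table
-- ===== Notes on version B (the rewrite author's own statement) =====
-- stated objective: faster
-- what changed: Replaces A's preallocated table filled by scanning a (2^(i-1)+1)-element slice of the previous level for every cell with the standard sparse-table doubling recurrence: each new level row is built from the previous row as the min of just two precomputed half-window cells, appending rows (with the same zero padding) one level at a time.
import Mathlib
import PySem

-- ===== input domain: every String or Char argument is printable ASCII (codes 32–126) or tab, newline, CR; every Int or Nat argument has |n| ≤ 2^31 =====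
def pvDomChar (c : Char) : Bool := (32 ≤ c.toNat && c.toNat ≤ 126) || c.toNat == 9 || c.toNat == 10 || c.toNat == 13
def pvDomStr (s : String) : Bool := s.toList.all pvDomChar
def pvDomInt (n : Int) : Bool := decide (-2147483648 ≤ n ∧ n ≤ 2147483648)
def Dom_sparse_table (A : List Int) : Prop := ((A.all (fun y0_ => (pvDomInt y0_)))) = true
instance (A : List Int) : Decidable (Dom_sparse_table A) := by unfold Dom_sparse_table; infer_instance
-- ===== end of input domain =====

-- B replaces A's per-cell scan of a (2^(i-1)+1)-long slice of the previous level by the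
-- standard sparse-table doubling recurrence (min of two half-window cells); asymptotically faster.

-- ===== PORT A =====
-- math.floor(math.log2(N)) + 1 is Nat.log2 N + 1 for 1 ≤ N ≤ 2^31 (the double log2 error cannot
-- cross an integer there); N = 0 raises ValueError and is excluded by Pre_.
-- range(N - 2**i + 1): Nat subtraction is exact here since 2^i ≤ N for every executed level i (N ≥ 1).
-- A[j], table[i], table[i-1] are accessed at provably in-range nonnegative indices, so getD is exact;
-- min(...) is applied to a provably nonempty slice, so the .getD 0 totalization is never used.
def sparse_table (A : List Int) : List (List Int) :=
  let N := A.length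
  let M := Nat.log2 N + 1
  let temp : List Int := List.replicate N 0
  let table : List (List Int) := (List.range M).map (fun _ => temp)
  (List.range M).foldl (fun table i =>
    (List.range (N - 2 ^ i + 1)).foldl (fun table j =>
      if i == 0 then
        table.set i ((table.getD i []).set j (A.getD j 0))
      else
        table.set i ((table.getD i []).set j
          ((PySem.List.min? (PySem.List.slice (table.getD (i - 1) [])
              (some (j : Int)) (some ((j : Int) + ((2 ^ (i - 1) + 1 : Nat) : Int)))) (fun y => y)).getD 0))
    ) table) table

-- ===== PORT B =====
-- the while-loop of Source B: append one level per iteration while (1 << i) <= N; 'prev' is table[-1]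
def altLoop (A : List Int) (N : Nat) (table : List (List Int)) (prev : List Int) (i : Nat) :
    List (List Int) :=
  if h : 2 ^ i ≤ N then
    let half := 2 ^ (i - 1)
    let row := (List.range (N - 2 ^ i + 1)).map
                 (fun j => min (prev.getD j 0) (prev.getD (j + half) 0))
               ++ List.replicate (2 ^ i - 1) 0
    altLoop A N (table ++ [row]) row (i + 1)
  else table
termination_by N + 1 - 2 ^ i
decreasing_by
  have h2 : 2 ^ i < 2 ^ (i + 1) := Nat.pow_lt_pow_succ (by norm_num)
  omega

def sparse_table_alt (A : List Int) : List (List Int) :=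
  altLoop A A.length [A] A 1

-- ===== PRECONDITION & SPEC =====
-- Pre_ excludes only the empty list, on which A raises ValueError (math.log2(0)).
def Pre_sparse_table (A : List Int) : Prop := A ≠ []
instance (A : List Int) : Decidable (Pre_sparse_table A) := by unfold Pre_sparse_table; infer_instance
def pvWitness_sparse_table : List Int := [3, 1, 4, 1, 5]

def Spec_sparse_table (A : List Int) (out : List (List Int)) : Prop := out = sparse_table_alt A
instance (A : List Int) (out : List (List Int)) : Decidable (Spec_sparse_table A out) := by
  unfold Spec_sparse_table; infer_instance

-- ===== CLAIM (what is proved, stated in full; the proofs are below) =====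
def Claim_equal_sparse_table : Prop :=
  ∀ (A : List Int), Dom_sparse_table A → Pre_sparse_table A →
    Spec_sparse_table A (sparse_table A)

-- ===== LEMMAS AND PROOFS =====

-- min of a nonempty list, Python's running-min loop; 0 is a never-used default
def minND (l : List Int) : Int := match l with | [] => 0 | x :: t => t.foldl min x

-- min over the window A[j], …, A[j+len-1]
def wmin (A : List Int) (j len : Nat) : Int := minND ((A.drop j).take len)

-- the level-i row both programs build: window minima, padded with 2^i - 1 zeros
def wrow (A : List Int) (i : Nat) : List Int :=
  (List.range (A.length - 2 ^ i + 1)).map (fun j => wmin A j (2 ^ i))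
    ++ List.replicate (2 ^ i - 1) 0

theorem foldl_min_comm (l : List Int) : ∀ z w : Int,
    l.foldl min (min z w) = min z (l.foldl min w) := by
  induction l with
  | nil => intro z w; simp
  | cons c l ih =>
      intro z w
      simp only [List.foldl_cons, min_assoc]
      exact ih z (min w c)

theorem minND_append (l₁ l₂ : List Int) (h₁ : l₁ ≠ []) (h₂ : l₂ ≠ []) :
    minND (l₁ ++ l₂) = min (minND l₁) (minND l₂) := by
  match l₁, l₂ with
  | x :: t, y :: u =>
      simp only [minND, List.cons_append, List.foldl_append, List.foldl_cons]
      rw [← foldl_min_comm u (t.foldl min x) y]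

theorem minND_le (l : List Int) (x : Int) (hx : x ∈ l) : minND l ≤ x := by
  match l with
  | a :: t =>
      rcases List.mem_cons.1 hx with h | h
      · subst h; exact (PySem.List.foldl_min_le t x).1
      · exact (PySem.List.foldl_min_le t a).2 x h

theorem minND_mem (l : List Int) (h : l ≠ []) : minND l ∈ l := by
  match l with
  | a :: t =>
      rcases PySem.List.foldl_min_mem t a with h1 | h1
      · rw [minND, h1]; exact List.mem_cons_self
      · exact List.mem_cons_of_mem a h1

theorem win_nonempty (A : List Int) (j len : Nat) (hj : j < A.length) (hl : 1 ≤ len) :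
    (A.drop j).take len ≠ [] := by
  have : ((A.drop j).take len).length = min len (A.length - j) := by simp
  intro hnil
  rw [hnil] at this
  simp at this
  omega

theorem wmin_split (A : List Int) (j a b : Nat) (ha : 1 ≤ a) (hb : 1 ≤ b)
    (hle : j + a + b ≤ A.length) :
    wmin A j (a + b) = min (wmin A j a) (wmin A (j + a) b) := by
  have hsplit : (A.drop j).take (a + b) = (A.drop j).take a ++ (A.drop (j + a)).take b := by
    rw [List.take_add, List.drop_drop]
    try congr 2
    try omega
  rw [wmin, hsplit, minND_append _ _ (win_nonempty A j a (by omega) ha)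
      (win_nonempty A (j + a) b (by omega) hb)]
  rfl

theorem wmin_mono (A : List Int) (j a k b : Nat) (hjk : j ≤ k) (hkb : k + b ≤ j + a)
    (hb : 1 ≤ b) (hja : j + a ≤ A.length) :
    wmin A j a ≤ wmin A k b := by
  have hsub : (A.drop k).take b ⊆ (A.drop j).take a := by
    intro x hx
    have hdk : A.drop k = (A.drop j).drop (k - j) := by
      rw [List.drop_drop]; congr 1; omega
    have h1 : (A.drop k).take b = (((A.drop j).take a).drop (k - j)).take b := by
      rw [List.drop_take, ← hdk, List.take_take]
      congr 1
      omega
    rw [h1] at hx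
    exact List.drop_subset _ _ (List.take_subset _ _ hx)
  have hmem : wmin A k b ∈ (A.drop k).take b :=
    minND_mem _ (win_nonempty A k b (by omega) hb)
  exact minND_le _ _ (hsub hmem)

theorem wmin_heart (A : List Int) (j h : Nat) (hh : 1 ≤ h) (hle : j + 2 * h ≤ A.length) :
    minND ((List.range' j (h + 1)).map (fun k => wmin A k h)) = wmin A j (2 * h) := by
  have hcons : List.range' j (h + 1) = j :: List.range' (j + 1) h := List.range'_succ
  rw [hcons]
  simp only [List.map_cons, minND]
  set t := (List.range' (j + 1) h).map (fun k => wmin A k h) with ht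
  have h2 : 2 * h = h + h := by omega
  have hsplit : wmin A j (2 * h) = min (wmin A j h) (wmin A (j + h) h) := by
    rw [h2]; exact wmin_split A j h h hh hh (by omega)
  apply le_antisymm
  · rw [hsplit]
    apply le_min
    · exact (PySem.List.foldl_min_le t (wmin A j h)).1
    · apply (PySem.List.foldl_min_le t (wmin A j h)).2
      rw [ht]
      exact List.mem_map_of_mem (List.mem_range'_1.mpr ⟨by omega, by omega⟩)
  · rcases PySem.List.foldl_min_mem t (wmin A j h) with heq | hmem
    · rw [heq]
      exact wmin_mono A j (2 * h) j h (le_refl _) (by omega) hh (by omega)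
    · rw [ht] at hmem
      rcases List.mem_map.1 hmem with ⟨k, hk, hkeq⟩
      rw [List.mem_range'] at hk
      rw [← hkeq]
      exact wmin_mono A j (2 * h) k h (by omega) (by omega) hh (by omega)

theorem wmin_one (A : List Int) (j : Nat) (hj : j < A.length) :
    wmin A j 1 = A.getD j 0 := by
  have : (A.drop j).take 1 = [A[j]] := by
    have h1 : A.drop j = A[j] :: A.drop (j + 1) := List.drop_eq_getElem_cons hj
    rw [h1]; rfl
  rw [wmin, this, minND]
  simp [hj]

theorem wrow_zero (A : List Int) (hA : 1 ≤ A.length) : wrow A 0 = A := by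
  rw [wrow]
  simp only [pow_zero]
  have h1 : A.length - 1 + 1 = A.length := by omega
  rw [h1]
  have h2 : (List.range A.length).map (fun j => wmin A j 1)
      = (List.range A.length).map (fun j => A.getD j 0) := by
    apply List.map_congr_left
    intro j hj
    exact wmin_one A j (List.mem_range.1 hj)
  rw [h2]
  simp [List.getD_eq_getElem?_getD]
  exact List.ext_getElem (by simp) (by intro i h1' h2'; simp [List.getElem?_eq_getElem h2'])

theorem wrow_getD (A : List Int) (i j : Nat) (h : 2 ^ i ≤ A.length)
    (hj : j < A.length - 2 ^ i + 1) : (wrow A i).getD j 0 = wmin A j (2 ^ i) := by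
  rw [wrow, List.getD_eq_getElem?_getD, List.getElem?_append_left (by simpa using hj)]
  simp [hj]

-- the inner j-loop of A: folding table[i][j] = F(table, j) equals one set of row i,
-- provided F is insensitive to row i (it reads row i-1 or only A)
theorem foldl_set2 (i : Nat) (F : List (List Int) → Nat → Int)
    (hF : ∀ tb r j, F (tb.set i r) j = F tb j) :
    ∀ (js : List Nat) (tb : List (List Int)), i < tb.length →
    List.foldl (fun tb j => tb.set i ((tb.getD i []).set j (F tb j))) tb js
      = tb.set i (js.foldl (fun r j => r.set j (F tb j)) (tb.getD i [])) := by
  intro js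
  induction js with
  | nil =>
      intro tb hi
      simp only [List.foldl_nil]
      rw [List.getD_eq_getElem _ _ hi, List.set_getElem_self]
  | cons j js ih =>
      intro tb hi
      simp only [List.foldl_cons]
      rw [ih _ (by simpa using hi)]
      rw [List.set_set]
      have hgd : ((tb.set i ((tb.getD i []).set j (F tb j))).getD i [])
          = (tb.getD i []).set j (F tb j) := by
        have hl : i < (tb.set i ((tb.getD i []).set j (F tb j))).length := by simpa using hi
        rw [List.getD_eq_getElem _ _ hl]
        simp
      have hfun : (fun (r : List Int) (j' : Nat) =>
            r.set j' (F (tb.set i ((tb.getD i []).set j (F tb j))) j'))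
          = fun (r : List Int) (j' : Nat) => r.set j' (F tb j') := by
        funext r j'
        rw [hF]
      rw [hgd, hfun]

-- folding r[j] = g j over j in range L fills the first L entries
theorem foldl_set_range (g : Nat → Int) :
    ∀ (L : Nat) (r : List Int), L ≤ r.length →
    (List.range L).foldl (fun r j => r.set j (g j)) r
      = (List.range L).map g ++ r.drop L := by
  intro L
  induction L with
  | zero => intro r _; simp
  | succ L ih =>
      intro r hL
      rw [List.range_succ, List.foldl_append, List.foldl_cons, List.foldl_nil, ih r (by omega)]
      have hsplit : r.drop L = r[L] :: r.drop (L + 1) := List.drop_eq_getElem_cons (by omega)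
      have hlen : ((List.range L).map g).length = L := by simp
      rw [hsplit, List.set_append_right _ _ (by omega), hlen, Nat.sub_self]
      simp
      rw [hsplit]
      rfl

-- the outer-loop body of port A, named for the invariant proof (definitionally the port's lambda)
def stepA (A : List Int) (tb : List (List Int)) (i : Nat) : List (List Int) :=
  (List.range (A.length - 2 ^ i + 1)).foldl (fun table j =>
    if i == 0 then
      table.set i ((table.getD i []).set j (A.getD j 0))
    else
      table.set i ((table.getD i []).set j
        ((PySem.List.min? (PySem.List.slice (table.getD (i - 1) [])
            (some (j : Int)) (some ((j : Int) + ((2 ^ (i - 1) + 1 : Nat) : Int)))) (fun y => y)).getD 0))) tb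

theorem range_drop_take (n j t : Nat) (h : j + t ≤ n) :
    ((List.range n).drop j).take t = List.range' j t := by
  apply List.ext_getElem
  · simp; omega
  · intro k h1 h2
    simp [List.getElem_range']
    try omega

theorem slice_min_eval (A : List Int) (k j : Nat) (h2 : 2 ^ (k + 1) ≤ A.length)
    (hj : j < A.length - 2 ^ (k + 1) + 1) :
    (PySem.List.min? (PySem.List.slice (wrow A k) (some (j : Int))
        (some ((j : Int) + ((2 ^ k + 1 : Nat) : Int)))) (fun y => y)).getD 0
      = wmin A j (2 ^ (k + 1)) := by
  have hpow : 2 ^ (k + 1) = 2 ^ k + 2 ^ k := by rw [pow_succ]; ring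
  have hk1 : 1 ≤ 2 ^ k := Nat.one_le_two_pow
  rw [PySem.List.slice_natCast_add]
  have hwin : ((wrow A k).drop j).take (2 ^ k + 1)
      = (List.range' j (2 ^ k + 1)).map (fun m => wmin A m (2 ^ k)) := by
    rw [wrow, List.drop_append_of_le_length (by simp; omega),
        List.take_append_of_le_length (by simp; omega)]
    rw [← List.map_drop, ← List.map_take, range_drop_take _ _ _ (by omega)]
  rw [hwin, List.range'_succ, List.map_cons, PySem.List.min?_id_cons, Option.getD_some]
  have := wmin_heart A j (2 ^ k) hk1 (by omega)
  rw [List.range'_succ, List.map_cons] at this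
  simp only [minND] at this
  rw [this]
  congr 1
  omega

theorem stepA_eval (A : List Int) (i : Nat) (h2 : 2 ^ i ≤ A.length) (tb : List (List Int))
    (hil : i < tb.length)
    (hprev : 1 ≤ i → tb.getD (i - 1) [] = wrow A (i - 1))
    (hcur : tb.getD i [] = List.replicate A.length 0) :
    stepA A tb i = tb.set i (wrow A i) := by
  have hL : A.length - 2 ^ i + 1 ≤ A.length := by
    have hk1 : 1 ≤ 2 ^ i := Nat.one_le_two_pow
    omega
  cases i with
  | zero =>
      simp only [stepA, beq_self_eq_true, if_true]
      rw [foldl_set2 0 (fun _ j => A.getD j 0) (fun _ _ _ => rfl) _ tb hil]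
      congr 1
      rw [hcur, foldl_set_range _ _ _ (by simp; omega), List.drop_replicate]
      rw [wrow]
      simp only [pow_zero]
      congr 1
      · apply List.map_congr_left
        intro j hj
        rw [List.mem_range] at hj
        rw [wmin_one A j (by omega)]
      · congr 1
        omega
  | succ k =>
      simp only [stepA, Nat.succ_ne_zero, beq_iff_eq, if_false, Nat.add_sub_cancel]
      rw [foldl_set2 (k + 1)
        (fun table j => ((PySem.List.min? (PySem.List.slice (table.getD k [])
            (some (j : Int)) (some ((j : Int) + ((2 ^ k + 1 : Nat) : Int)))) (fun y => y)).getD 0))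
        (by
          intro tb' r j
          have hg : (tb'.set (k + 1) r).getD k [] = tb'.getD k [] := by
            rw [List.getD_eq_getElem?_getD, List.getD_eq_getElem?_getD,
              List.getElem?_set_ne (by omega)]
          simp only [hg]) _ tb hil]
      congr 1
      have hprev' := hprev (by omega)
      simp only [Nat.add_sub_cancel] at hprev'
      rw [hprev', hcur, foldl_set_range _ _ _ (by simp; omega), List.drop_replicate]
      rw [wrow]
      congr 1
      · apply List.map_congr_left
        intro j hj
        rw [List.mem_range] at hj
        exact slice_min_eval A k j h2 hj
      · congr 1
        have hk1 : 1 ≤ 2 ^ (k + 1) := Nat.one_le_two_pow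
        omega

theorem foldA (A : List Int) (hN : 1 ≤ A.length) :
    ∀ i, i ≤ Nat.log2 A.length + 1 →
    (List.range i).foldl (stepA A)
        ((List.range (Nat.log2 A.length + 1)).map fun _ => List.replicate A.length 0)
      = (List.range (Nat.log2 A.length + 1)).map
          (fun k => if k < i then wrow A k else List.replicate A.length 0) := by
  intro i
  induction i with
  | zero => intro _; simp
  | succ i ih =>
      intro hi
      set M := Nat.log2 A.length + 1 with hM
      rw [show List.range (i + 1) = List.range i ++ [i] from List.range_succ,
        List.foldl_append, List.foldl_cons, List.foldl_nil, ih (by omega)]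
      set tb := (List.range M).map
          (fun k => if k < i then wrow A k else List.replicate A.length 0) with htb
      have hlen : tb.length = M := by simp [htb]
      have hget : ∀ k, k < M →
          tb.getD k [] = if k < i then wrow A k else List.replicate A.length 0 := by
        intro k hk
        rw [List.getD_eq_getElem _ _ (by omega)]
        simp [htb, hk]
      have h2 : 2 ^ i ≤ A.length := (Nat.le_log2 (by omega)).mp (by omega)
      rw [stepA_eval A i h2 tb (by omega)
        (fun h1 => by
          rw [hget (i - 1) (by omega)]
          rw [if_pos (by omega)])
        (by rw [hget i (by omega)]; simp)]
      apply List.ext_getElem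
      · simp [hlen]
      · intro k hk1 hk2
        rw [List.getElem_set]
        by_cases hki : i = k
        · subst hki
          simp
        · have hkM : k < M := by simp_all [hlen]
          rw [if_neg hki]
          simp only [htb, List.getElem_map, List.getElem_range]
          by_cases hlt : k < i
          · rw [if_pos hlt, if_pos (by omega)]
          · rw [if_neg hlt, if_neg (by omega)]

theorem rowB_eval (A : List Int) (k : Nat) (h2 : 2 ^ (k + 1) ≤ A.length) :
    (List.range (A.length - 2 ^ (k + 1) + 1)).map
        (fun j => min ((wrow A k).getD j 0) ((wrow A k).getD (j + 2 ^ k) 0))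
      ++ List.replicate (2 ^ (k + 1) - 1) 0 = wrow A (k + 1) := by
  have hpow : 2 ^ (k + 1) = 2 ^ k + 2 ^ k := by rw [pow_succ]; ring
  have hk1 : 1 ≤ 2 ^ k := Nat.one_le_two_pow
  conv_rhs => rw [wrow]
  congr 1
  apply List.map_congr_left
  intro j hj
  rw [List.mem_range] at hj
  rw [wrow_getD A k j (by omega) (by omega), wrow_getD A k (j + 2 ^ k) (by omega) (by omega)]
  rw [show (2 : Nat) ^ (k + 1) = 2 ^ k + 2 ^ k from hpow]
  exact (wmin_split A j (2 ^ k) (2 ^ k) hk1 hk1 (by omega)).symm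

theorem foldB (A : List Int) (hN : 1 ≤ A.length) :
    ∀ n i tb prev, 1 ≤ i → Nat.log2 A.length + 1 - i = n → prev = wrow A (i - 1) →
    altLoop A A.length tb prev i = tb ++ (List.range' i n).map (wrow A) := by
  intro n
  induction n with
  | zero =>
      intro i tb prev hi hn hprev
      rw [altLoop]
      rw [dif_neg (by
        intro h
        have := (Nat.le_log2 (by omega)).mpr h
        omega)]
      simp
  | succ n ih =>
      intro i tb prev hi hn hprev
      have h2 : 2 ^ i ≤ A.length := (Nat.le_log2 (by omega)).mp (by omega)
      rw [altLoop]
      rw [dif_pos h2]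
      obtain ⟨k, rfl⟩ : ∃ k, i = k + 1 := ⟨i - 1, by omega⟩
      simp only [Nat.add_sub_cancel] at hprev ⊢
      rw [hprev]
      rw [rowB_eval A k h2]
      rw [ih (k + 2) _ _ (by omega) (by omega) (by simp)]
      rw [List.append_assoc]
      congr 1
      try rw [List.range'_succ]
      try simp

-- ===== VERDICT (by name: the statement is the Claim_ definition above) =====
theorem sparse_table_spec : Claim_equal_sparse_table := by
  intro A _ hpre
  unfold Spec_sparse_table
  have hN : 1 ≤ A.length := by
    cases A with
    | nil => exact absurd rfl hpre
    | cons a t => simp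
  have hA : sparse_table A = (List.range (Nat.log2 A.length + 1)).foldl (stepA A)
      ((List.range (Nat.log2 A.length + 1)).map fun _ => List.replicate A.length 0) := rfl
  rw [hA, foldA A hN (Nat.log2 A.length + 1) (le_refl _)]
  have hmap : (List.range (Nat.log2 A.length + 1)).map
      (fun k => if k < Nat.log2 A.length + 1 then wrow A k else List.replicate A.length 0)
      = (List.range (Nat.log2 A.length + 1)).map (wrow A) :=
    List.map_congr_left (fun k hk => by rw [if_pos (List.mem_range.mp hk)])
  rw [hmap]
  have hB : sparse_table_alt A = [A] ++
      (List.range' 1 (Nat.log2 A.length + 1 - 1)).map (wrow A) := by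
    unfold sparse_table_alt
    exact foldB A hN (Nat.log2 A.length + 1 - 1) 1 [A] A (le_refl _) rfl
      (by simp [wrow_zero A hN])
  rw [hB]
  have hrange : List.range (Nat.log2 A.length + 1)
      = 0 :: List.range' 1 (Nat.log2 A.length) := by
    rw [List.range_eq_range', List.range'_succ]
  rw [hrange]
  simp only [List.map_cons, Nat.add_sub_cancel, List.singleton_append]
  rw [wrow_zero A hN]
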